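-- pv_equiv track=rewrite | github.com/christopher-besch/ohg_plan_parser | plan_parser/get_intel.py | scan
-- ===== SOURCE A (Python) =====
-- def scan(vp):
--     marks = []
--     for line in vp:
--         # defining positions of last start and end of general information
--         text_start = 0
--         text_end = 0
--         for idx, mark in enumerate(marks):
--             if mark == "text_end":
--                 text_end = idx
--             elif mark == "text_start":
--                 text_start = idx
--
--         # finding line with the day the vp is made for
--         if "Ausfertigung" in line:
--             marks.append("new_day")
--             continue
--
--         # finding line with pressure on schedule
--         if "      |   / " in line:
--             marks.append("pressure")
--             continue
--
--         # finding blank lines with no information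
--         if line == "      |":
--             # to prevent index errors this part will only run when there are already at least 3 lines marked
--             if len(marks) > 2:
--                 # if there are two blank lines (the current and the last one),
--                 # the line before those two will contain the last line of the general information block
--                 # text_start > text_end is true when the current line is in the general information block or the end of
--                 # this block has not been found yet
--                 if line == "      |" and marks[-1] == "blank" and text_start > text_end:
--                     marks[-2] = "text_end"
--             marks.append("blank")
--             continue
--
--         # when there are at least 3 lines marked
--         if len(marks) >= 3:
--             # two lines after the "pressure"-line the general information block will start
--             if marks[-2] == "pressure":
--                 marks.append("text_start")
--                 continue
--
--             # when the current line is in between text_start and text_end,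
--             # (when text_end does not contain the right index of the end of the general information block,
--             # it will be smaller then text_start)
--             # the current line will contain general information
--             if text_start > text_end:
--                 marks.append("text")
--                 continue
--
--             # searching for single class information
--             if "      |  " in line:
--                 # when the class name could not be found, the line takes its place
--                 group = str(line)
--                 for idx, mark in enumerate(marks):
--                     if mark == "class_name":
--                         # extracting class names
--                         group = vp[idx][7:].replace(":", "")
--                 marks.append(group)
--                 continue
--
--         if "      |" in line:
--             marks.append("class_name")
--             continue
--
--         # default (something is not right)
--         marks.append("undefined")
--
--     # postprocessing
--     for idx, mark in enumerate(marks):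
--         # replacing text_start and text_end marks with text marks
--         # every possible class name at this point:
--         # text; new_day; pressure; blank; undefined (only when something goes wrong); class_name; [class name]
--         if mark == "text_start" or mark == "text_end":
--             marks[idx] = "text"
--     return marks
-- ===== SOURCE B (Python) =====
-- def scan(vp):
--     # One pass with running state (last two marks, inside-general-info flag, last class
--     # name) instead of rescanning the whole mark list for every line; output is built
--     # in final form, so no postprocessing pass either.
--     out = []
--     prev1 = prev2 = ""
--     in_text = False          # last "text_start" mark is more recent than last "text_end"
--     group = None             # class name extracted at the last "class_name" mark
--     for line in vp:
--         if "Ausfertigung" in line: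
--             mark = "new_day"
--         elif "      |   / " in line:
--             mark = "pressure"
--         elif line == "      |":
--             if len(out) > 2 and prev1 == "blank" and in_text:
--                 # line before the two blanks closes the general-information block
--                 out[-2] = "text"
--                 in_text = False
--             mark = "blank"
--         elif len(out) >= 3 and prev2 == "pressure":
--             mark = "text_start"
--         elif len(out) >= 3 and in_text:
--             mark = "text"
--         elif len(out) >= 3 and "      |  " in line:
--             mark = line if group is None else group
--         elif "      |" in line:
--             mark = "class_name"
--         else:
--             mark = "undefined"
--         # uniform state update driven by the mark that was just decided
--         if mark == "class_name":
--             group = line[7:].replace(":", "")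
--         if mark == "text_start":
--             in_text = True
--         elif mark == "text_end":
--             in_text = False
--         out.append("text" if mark in ("text_start", "text_end") else mark)
--         prev2, prev1 = prev1, mark
--     return out
-- ===== Notes on version B (the rewrite author's own statement) =====
-- stated objective: faster
-- what changed: B makes a single pass keeping running state (the last two marks, an inside-general-info-block flag, the last extracted class name) instead of rescanning the whole mark list for every line, and emits marks in final form so the postprocessing pass disappears.
import Mathlib
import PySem

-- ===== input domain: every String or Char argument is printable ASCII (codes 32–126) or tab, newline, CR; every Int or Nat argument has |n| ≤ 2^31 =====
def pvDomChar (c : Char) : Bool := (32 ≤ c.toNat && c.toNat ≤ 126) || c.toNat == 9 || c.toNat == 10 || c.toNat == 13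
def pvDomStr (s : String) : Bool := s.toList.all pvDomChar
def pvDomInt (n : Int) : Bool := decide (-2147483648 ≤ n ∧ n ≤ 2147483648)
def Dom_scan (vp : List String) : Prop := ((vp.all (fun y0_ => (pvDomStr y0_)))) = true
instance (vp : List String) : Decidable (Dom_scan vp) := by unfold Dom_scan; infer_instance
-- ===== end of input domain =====

-- B replaces A's per-line rescans of the mark list by running state carried through one
-- pass (objective: faster, O(n) instead of O(n^2)); return values are proved equal.

-- ===== PORT A =====
-- line[7:].replace(":", "")  (shared source text of both Pythons)
def extractGroup (s : String) : String :=
  PySem.Str.replace (PySem.Str.slice s (some 7) none) ":" ""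

-- the inner 'for idx, mark in enumerate(marks)' computing text_start/text_end
def tsTeStep (p : Int × Int) (im : Int × String) : Int × Int :=
  if im.2 == "text_end" then (p.1, im.1)
  else if im.2 == "text_start" then (im.1, p.2) else p

def tsTe (marks : List String) : Int × Int :=
  (PySem.List.enumerate marks).foldl tsTeStep (0, 0)

-- the inner 'for idx, mark in enumerate(marks)' extracting the last class name;
-- vp[idx] ported as pyGet?/getD: idx is an index of marks, and marks is never longer
-- than the processed prefix of vp, so the access is provably in range
def groupScan (vp : List String) (line : String) (marks : List String) : String :=
  (PySem.List.enumerate marks).foldl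
    (fun g (im : Int × String) =>
      if im.2 == "class_name" then extractGroup ((PySem.List.pyGet? vp im.1).getD "") else g)
    line

-- one iteration of A's main 'for line in vp' loop
def scanStep (vp : List String) (marks : List String) (line : String) : List String :=
  if PySem.Str.isIn "Ausfertigung" line then marks ++ ["new_day"]
  else if PySem.Str.isIn "      |   / " line then marks ++ ["pressure"]
  else if line == "      |" then
    (if marks.length > 2 then
       (if line == "      |" && (PySem.List.pyGet? marks (-1) == some "blank") &&
            decide ((tsTe marks).2 < (tsTe marks).1)
        then marks.set (marks.length - 2) "text_end"   -- marks[-2] = "text_end", len > 2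
        else marks)
     else marks) ++ ["blank"]
  else if decide (3 ≤ marks.length) && (PySem.List.pyGet? marks (-2) == some "pressure") then
    marks ++ ["text_start"]
  else if decide (3 ≤ marks.length) && decide ((tsTe marks).2 < (tsTe marks).1) then
    marks ++ ["text"]
  else if decide (3 ≤ marks.length) && PySem.Str.isIn "      |  " line then
    marks ++ [groupScan vp line marks]
  else if PySem.Str.isIn "      |" line then marks ++ ["class_name"]
  else marks ++ ["undefined"]

-- the postprocessing 'for idx, mark in enumerate(marks)' writing marks[idx] = "text"
def postStep (acc : List String) (im : Int × String) : List String :=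
  if im.2 == "text_start" || im.2 == "text_end" then acc.set im.1.toNat "text" else acc

def scan (vp : List String) : List String :=
  let marks := vp.foldl (scanStep vp) []
  (PySem.List.enumerate marks).foldl postStep marks

-- ===== PORT B =====
-- state: (out, prev1, prev2, in_text, group)
def altStep (st : List String × String × String × Bool × Option String) (line : String) :
    List String × String × String × Bool × Option String :=
  match st with
  | (out, prev1, prev2, inText, group) =>
    let (out, inText, mark) :=
      if PySem.Str.isIn "Ausfertigung" line then (out, inText, "new_day")
      else if PySem.Str.isIn "      |   / " line then (out, inText, "pressure")
      else if line == "      |" then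
        (if decide (out.length > 2) && prev1 == "blank" && inText then
          (out.set (out.length - 2) "text", false, "blank")   -- out[-2] = "text", len > 2
        else (out, inText, "blank"))
      else if decide (3 ≤ out.length) && prev2 == "pressure" then (out, inText, "text_start")
      else if decide (3 ≤ out.length) && inText then (out, inText, "text")
      else if decide (3 ≤ out.length) && PySem.Str.isIn "      |  " line then
        (out, inText, group.getD line)
      else if PySem.Str.isIn "      |" line then (out, inText, "class_name")
      else (out, inText, "undefined")
    let group := if mark == "class_name" then some (extractGroup line) else group
    let inText := if mark == "text_start" then true
                  else if mark == "text_end" then false else inText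
    let out := out ++ [if mark == "text_start" || mark == "text_end" then "text" else mark]
    (out, mark, prev1, inText, group)

def scan_alt (vp : List String) : List String :=
  (vp.foldl altStep ([], "", "", false, none)).1

-- ===== PRECONDITION & SPEC =====
def Spec_scan (vp : List String) (out : List String) : Prop := out = scan_alt vp
instance (vp : List String) (out : List String) : Decidable (Spec_scan vp out) := by unfold Spec_scan; infer_instance

-- ===== CLAIM (what is proved, stated in full; the proofs are below) =====
def Claim_equal_scan : Prop := ∀ (vp : List String), Dom_scan vp → Spec_scan vp (scan vp)

-- ===== LEMMAS AND PROOFS =====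

-- the postprocessing replacement applied to a single mark
def postf (m : String) : String :=
  if m == "text_start" || m == "text_end" then "text" else m

lemma tsTe_snoc (ms : List String) (m : String) :
    tsTe (ms ++ [m]) = tsTeStep (tsTe ms) ((ms.length : Int), m) := by
  simp [tsTe, PySem.List.enumerate_append, PySem.List.enumerate_cons, PySem.List.enumerate_nil]

lemma tsTe_bound (ms : List String) :
    0 ≤ (tsTe ms).1 ∧ ((tsTe ms).1 = 0 ∨ (tsTe ms).1 < ms.length) ∧
    0 ≤ (tsTe ms).2 ∧ ((tsTe ms).2 = 0 ∨ (tsTe ms).2 < ms.length) := by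
  induction ms using List.reverseRecOn with
  | nil => simp [tsTe, PySem.List.enumerate_nil]
  | append_singleton ms m ih =>
    rw [tsTe_snoc]
    unfold tsTeStep
    simp only [List.length_append, List.length_singleton]
    push_cast
    split_ifs <;> simp <;> omega

lemma groupScan_snoc (vp : List String) (line : String) (ms : List String) (m : String) :
    groupScan vp line (ms ++ [m]) =
      if m == "class_name" then extractGroup ((PySem.List.pyGet? vp (ms.length : Int)).getD "")
      else groupScan vp line ms := by
  simp [groupScan, PySem.List.enumerate_append, PySem.List.enumerate_cons, PySem.List.enumerate_nil]

lemma postAux (ms pre acc : List String) (h : acc = pre ++ ms) :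
    (PySem.List.enumerate ms (pre.length : Int)).foldl postStep acc = pre ++ ms.map postf := by
  induction ms generalizing pre acc with
  | nil => simp [PySem.List.enumerate_nil, h]
  | cons m ms ih =>
    rw [PySem.List.enumerate_cons, List.foldl_cons]
    have hset : postStep acc ((pre.length : Int), m) = (pre ++ [postf m]) ++ ms := by
      unfold postStep postf
      subst h
      split_ifs with hc
      · simp
      · simp
    rw [hset]
    have := ih (pre ++ [postf m]) ((pre ++ [postf m]) ++ ms) rfl
    simpa using this

lemma decomp (ms : List String) (b : String) (h3 : 3 ≤ ms.length)
    (hl : ms.getLast? = some b) :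
    ∃ front x, ms = front ++ [x, b] ∧ front.length + 2 = ms.length := by
  induction ms using List.reverseRecOn with
  | nil => simp at h3
  | append_singleton ms m ih =>
    obtain rfl : m = b := by simpa using hl
    rcases ms.eq_nil_or_concat' with rfl | ⟨front, x, rfl⟩
    · simp at h3
    · exact ⟨front, x, by simp, by simp⟩

structure ScanInv (vp marks : List String) (p1 p2 : String) (it : Bool) (g : Option String) : Prop where
  hp1 : 1 ≤ marks.length → marks.getLast? = some p1
  hp2 : 2 ≤ marks.length → marks[marks.length - 2]? = some p2
  hit : it = decide ((tsTe marks).2 < (tsTe marks).1)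
  hg : ∀ line, groupScan vp line marks = g.getD line
  hstruct : it = true → 3 ≤ marks.length ∧ (tsTe marks).1 < (marks.length : Int) ∧
      marks[(tsTe marks).1.toNat]? = some "text_start" ∧
      ∀ k : Nat, marks[k]? = some "class_name" → (k : Int) < (tsTe marks).1

lemma snoc_inv (vp marks : List String) (p1 p2 : String) (it : Bool) (g : Option String)
    (line m : String)
    (hInv : ScanInv vp marks p1 p2 it g)
    (hvp : (PySem.List.pyGet? vp ((marks.length : Nat) : Int)).getD "" = line)
    (h_ts : m = "text_start" → 3 ≤ marks.length)
    (h_class : m = "class_name" → it = false) :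
    ScanInv vp (marks ++ [m]) m p1
      (if m == "text_start" then true else if m == "text_end" then false else it)
      (if m == "class_name" then some (extractGroup line) else g) := by
  obtain ⟨hp1, hp2, hit, hg, hstruct⟩ := hInv
  obtain ⟨hb1, hb2, hb3, hb4⟩ := tsTe_bound marks
  refine ⟨by intro _; simp, ?_, ?_, ?_, ?_⟩
  · intro h2
    simp only [List.length_append, List.length_singleton] at h2 ⊢
    have h1 : 1 ≤ marks.length := by omega
    have hlast := hp1 h1
    rw [List.getLast?_eq_getElem?] at hlast
    have hidx : marks.length + 1 - 2 = marks.length - 1 := by omega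
    rw [hidx, List.getElem?_append_left (by omega)]
    exact hlast
  · rw [tsTe_snoc]
    unfold tsTeStep
    by_cases hme : m = "text_end"
    · simp only [hme, beq_self_eq_true, if_true]
      rw [eq_comm]
      simp only [beq_iff_eq, String.reduceEq, if_false, decide_eq_false_iff_not, not_lt]
      omega
    · by_cases hms : m = "text_start"
      · have h3 := h_ts hms
        subst hms
        simp only [beq_self_eq_true, if_true, beq_iff_eq, String.reduceEq, if_false]
        rw [eq_comm]
        simp only [decide_eq_true_eq]
        omega
      · simp only [beq_iff_eq, hme, hms, if_false]
        exact hit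
  · intro line'
    rw [groupScan_snoc]
    have hvp' : vp[marks.length]?.getD "" = line := by simpa using hvp
    by_cases hmc : m = "class_name"
    · simp [hmc, hvp']
    · simp [hmc, hg line']
  · intro hit'
    rw [tsTe_snoc]
    unfold tsTeStep
    by_cases hms : m = "text_start"
    · have h3 := h_ts hms
      subst hms
      simp only [beq_iff_eq, String.reduceEq, if_false, beq_self_eq_true, if_true,
        List.length_append, List.length_singleton]
      refine ⟨by omega, by push_cast; omega, ?_, ?_⟩
      · rw [Int.toNat_natCast, List.getElem?_concat_length]
      · intro k hk
        rcases Nat.lt_trichotomy k marks.length with hlt | heq | hgt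
        · exact_mod_cast hlt
        · subst heq
          rw [List.getElem?_concat_length] at hk
          exact absurd hk (by simp)
        · rw [List.getElem?_append_right (by omega)] at hk
          rw [List.getElem?_eq_none (by simp; omega)] at hk
          exact absurd hk (by simp)
    · by_cases hme : m = "text_end"
      · subst hme
        simp at hit'
      · simp only [beq_iff_eq, if_neg hms, if_neg hme] at hit'
        have hmc : m ≠ "class_name" := fun h => by rw [h_class h] at hit'; simp at hit'
        obtain ⟨hA3, hAts, hAentry, hAclass⟩ := hstruct hit'
        simp only [beq_iff_eq, hms, hme, if_false, List.length_append, List.length_singleton]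
        refine ⟨by omega, by push_cast; omega, ?_, ?_⟩
        · rw [List.getElem?_append_left (by omega)]
          exact hAentry
        · intro k hk
          rcases Nat.lt_trichotomy k marks.length with hlt | heq | hgt
          · rw [List.getElem?_append_left hlt] at hk
            exact hAclass k hk
          · subst heq
            rw [List.getElem?_concat_length] at hk
            exact absurd hk (by simp [hmc])
          · rw [List.getElem?_append_right (by omega)] at hk
            rw [List.getElem?_eq_none (by simp; omega)] at hk
            simp at hk

lemma set_inv (vp marks : List String) (p2 : String) (g : Option String)
    (hInv : ScanInv vp marks "blank" p2 true g) (hn : 2 < marks.length) :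
    ScanInv vp ((marks.set (marks.length - 2) "text_end") ++ ["blank"]) "blank" "blank" false g := by
  obtain ⟨hp1, hp2, hit, hg, hstruct⟩ := hInv
  obtain ⟨hA3, hAts, hAentry, hAclass⟩ := hstruct rfl
  obtain ⟨front, x, hfx, hfl⟩ := decomp marks "blank" (by omega) (hp1 (by omega))
  obtain ⟨fb1, fb2, fb3, fb4⟩ := tsTe_bound front
  have hle : marks.length - 2 = front.length := by omega
  have hset : marks.set (marks.length - 2) "text_end" = front ++ ["text_end", "blank"] := by
    rw [hle, hfx, List.set_append_right _ _ (le_refl _)]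
    simp
  have hxel : marks[front.length]? = some x := by
    rw [hfx, List.getElem?_append_right (le_refl _)]
    simp
  have hbel : marks[front.length + 1]? = some "blank" := by
    rw [hfx, List.getElem?_append_right (by omega)]
    simp
  have hx_ne : x ≠ "class_name" := by
    intro hxc
    have h1 := hAclass front.length (by rw [hxel, hxc])
    have h2 : (tsTe marks).1.toNat = front.length + 1 := by omega
    rw [h2, hbel] at hAentry
    simp at hAentry
  have hsplit : (front ++ ["text_end", "blank"]) ++ ["blank"] =
      ((front ++ ["text_end"]) ++ ["blank"]) ++ ["blank"] := by simp
  have htst : tsTe ((front ++ ["text_end", "blank"]) ++ ["blank"]) =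
      ((tsTe front).1, (front.length : Int)) := by
    rw [hsplit, tsTe_snoc, tsTe_snoc, tsTe_snoc]
    unfold tsTeStep
    simp
  have hgs : ∀ line', groupScan vp line' ((front ++ ["text_end", "blank"]) ++ ["blank"]) =
      groupScan vp line' front := by
    intro line'
    rw [hsplit, groupScan_snoc, groupScan_snoc, groupScan_snoc]
    simp
  have hgold : ∀ line', groupScan vp line' marks = groupScan vp line' front := by
    intro line'
    rw [hfx, show front ++ [x, "blank"] = (front ++ [x]) ++ ["blank"] by simp,
      groupScan_snoc, groupScan_snoc]
    simp [hx_ne]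
  rw [hset]
  refine ⟨by intro _; simp, ?_, ?_, ?_, by intro h; simp at h⟩
  · intro _
    have hlen : ((front ++ ["text_end", "blank"]) ++ ["blank"]).length - 2 = front.length + 1 := by
      simp
    rw [hlen, List.getElem?_append_left (by simp), List.getElem?_append_right (by omega)]
    simp
  · rw [htst]
    have : ¬ ((front.length : Int) < (tsTe front).1) := by omega
    simp [this]
  · intro line'
    rw [hgs line', ← hgold line', hg line']

lemma step_main (vp marks : List String) (p1 p2 : String) (it : Bool) (g : Option String)
    (line : String) (rest : List String)
    (hdrop : vp.drop marks.length = line :: rest)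
    (hInv : ScanInv vp marks p1 p2 it g) :
    ∃ p1' p2' it' g',
      altStep (marks.map postf, p1, p2, it, g) line =
        ((scanStep vp marks line).map postf, p1', p2', it', g') ∧
      ScanInv vp (scanStep vp marks line) p1' p2' it' g' ∧
      (scanStep vp marks line).length = marks.length + 1 := by
  have hvp : (PySem.List.pyGet? vp ((marks.length : Nat) : Int)).getD "" = line := by
    have h : vp[marks.length]? = some line := by
      rw [← List.head?_drop, hdrop]
      rfl
    simp [h]
  have hInvc := hInv
  obtain ⟨hp1, hp2, hit, hg, hstruct⟩ := hInvc
  obtain ⟨hb1, hb2, hb3, hb4b⟩ := tsTe_bound marks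
  by_cases h1 : PySem.Str.isIn "Ausfertigung" line = true
  · have hA : scanStep vp marks line = marks ++ ["new_day"] := by
      unfold scanStep; rw [if_pos h1]
    refine ⟨"new_day", p1, it, g, ?_, ?_, by rw [hA]; simp⟩
    · rw [hA]; simp only [altStep]; rw [if_pos h1]; simp [postf]
    · rw [hA]
      simpa using snoc_inv vp marks p1 p2 it g line "new_day" hInv hvp (by simp) (by simp)
  by_cases h2 : PySem.Str.isIn "      |   / " line = true
  · have hA : scanStep vp marks line = marks ++ ["pressure"] := by
      unfold scanStep; rw [if_neg h1, if_pos h2]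
    refine ⟨"pressure", p1, it, g, ?_, ?_, by rw [hA]; simp⟩
    · rw [hA]; simp only [altStep]; rw [if_neg h1, if_pos h2]; simp [postf]
    · rw [hA]
      simpa using snoc_inv vp marks p1 p2 it g line "pressure" hInv hvp (by simp) (by simp)
  by_cases h3 : line = "      |"
  · subst h3
    have hc3 : (("      |" : String) == "      |") = true := by decide
    by_cases hn : 2 < marks.length
    · by_cases hc : p1 = "blank" ∧ it = true
      · obtain ⟨hpb, hitv⟩ := hc
        subst hpb
        have hd : decide ((tsTe marks).2 < (tsTe marks).1) = true := by rw [← hit]; exact hitv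
        have hin : ((("      |" : String) == "      |") &&
            (PySem.List.pyGet? marks (-1) == some "blank") &&
            decide ((tsTe marks).2 < (tsTe marks).1)) = true := by
          rw [PySem.List.pyGet?_neg_one, hp1 (by omega), hd]
          simp
        have hA : scanStep vp marks "      |" =
            (marks.set (marks.length - 2) "text_end") ++ ["blank"] := by
          unfold scanStep
          rw [if_neg h1, if_neg h2, if_pos hc3, if_pos hn, if_pos hin]
        have hBc : (decide ((marks.map postf).length > 2) && (("blank" : String) == "blank") && it)
            = true := by simp [hitv, hn]
        refine ⟨"blank", "blank", false, g, ?_, ?_, by rw [hA]; simp⟩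
        · rw [hA]; simp only [altStep]; rw [if_neg h1, if_neg h2, if_pos hc3, if_pos hBc]
          simp [postf, List.map_set]
        · rw [hA]
          exact set_inv vp marks p2 g (by rw [← hitv]; exact hInv) hn
      · have hin : ¬ (((("      |" : String) == "      |") &&
            (PySem.List.pyGet? marks (-1) == some "blank") &&
            decide ((tsTe marks).2 < (tsTe marks).1)) = true) := by
          intro h
          rw [PySem.List.pyGet?_neg_one, hp1 (by omega)] at h
          simp only [Bool.and_eq_true, beq_iff_eq, Option.some.injEq, decide_eq_true_eq] at h
          exact hc ⟨h.1.2, by rw [hit]; exact decide_eq_true h.2⟩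
        have hA : scanStep vp marks "      |" = marks ++ ["blank"] := by
          unfold scanStep
          rw [if_neg h1, if_neg h2, if_pos hc3, if_pos hn, if_neg hin]
        have hBc : ¬ ((decide ((marks.map postf).length > 2) && (p1 == "blank") && it) = true) := by
          intro h
          simp only [List.length_map, Bool.and_eq_true, beq_iff_eq, decide_eq_true_eq] at h
          exact hc ⟨h.1.2, h.2⟩
        refine ⟨"blank", p1, it, g, ?_, ?_, by rw [hA]; simp⟩
        · rw [hA]; simp only [altStep]; rw [if_neg h1, if_neg h2, if_pos hc3, if_neg hBc]
          simp [postf]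
        · rw [hA]
          simpa using snoc_inv vp marks p1 p2 it g "      |" "blank" hInv hvp (by simp) (by simp)
    · have hA : scanStep vp marks "      |" = marks ++ ["blank"] := by
        unfold scanStep
        rw [if_neg h1, if_neg h2, if_pos hc3, if_neg hn]
      have hBc : ¬ ((decide ((marks.map postf).length > 2) && (p1 == "blank") && it) = true) := by
        intro h
        simp only [List.length_map, Bool.and_eq_true, decide_eq_true_eq] at h
        exact hn h.1.1
      refine ⟨"blank", p1, it, g, ?_, ?_, by rw [hA]; simp⟩
      · rw [hA]; simp only [altStep]; rw [if_neg h1, if_neg h2, if_pos hc3, if_neg hBc]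
        simp [postf]
      · rw [hA]
        simpa using snoc_inv vp marks p1 p2 it g "      |" "blank" hInv hvp (by simp) (by simp)
  -- line is none of the three special forms
  have hc3 : ¬ ((line == "      |") = true) := by simpa using h3
  have hc4 : (decide (3 ≤ marks.length) && (PySem.List.pyGet? marks (-2) == some "pressure")) =
      (decide (3 ≤ marks.length) && (p2 == "pressure")) := by
    by_cases hn : 3 ≤ marks.length
    · rw [PySem.List.pyGet?_neg_ofNat marks 2 (by omega) (by omega), hp2 (by omega)]
      simp
    · simp [hn]
  have hc5 : (decide (3 ≤ marks.length) && decide ((tsTe marks).2 < (tsTe marks).1)) =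
      (decide (3 ≤ marks.length) && it) := by rw [hit]
  by_cases hb4 : (decide (3 ≤ marks.length) && (p2 == "pressure")) = true
  · have hn : 3 ≤ marks.length := by
      have h := hb4
      simp only [Bool.and_eq_true, decide_eq_true_eq] at h
      exact h.1
    have hA : scanStep vp marks line = marks ++ ["text_start"] := by
      unfold scanStep
      rw [if_neg h1, if_neg h2, if_neg hc3, if_pos (hc4.trans hb4)]
    refine ⟨"text_start", p1, true, g, ?_, ?_, by rw [hA]; simp⟩
    · rw [hA]; simp only [altStep]
      rw [if_neg h1, if_neg h2, if_neg hc3,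
        if_pos (by simpa only [List.length_map] using hb4)]
      simp [postf]
    · rw [hA]
      simpa using snoc_inv vp marks p1 p2 it g line "text_start" hInv hvp (fun _ => hn) (by simp)
  by_cases hb5 : (decide (3 ≤ marks.length) && it) = true
  · have hA : scanStep vp marks line = marks ++ ["text"] := by
      unfold scanStep
      rw [if_neg h1, if_neg h2, if_neg hc3, if_neg (fun h => hb4 (hc4 ▸ h)),
        if_pos (hc5.trans hb5)]
    refine ⟨"text", p1, it, g, ?_, ?_, by rw [hA]; simp⟩
    · rw [hA]; simp only [altStep]
      rw [if_neg h1, if_neg h2, if_neg hc3,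
        if_neg (by simpa only [List.length_map] using hb4),
        if_pos (by simpa only [List.length_map] using hb5)]
      simp [postf]
    · rw [hA]
      simpa using snoc_inv vp marks p1 p2 it g line "text" hInv hvp (by simp) (by simp)
  by_cases hb6 : (decide (3 ≤ marks.length) && PySem.Str.isIn "      |  " line) = true
  · have hn : 3 ≤ marks.length := by
      have h := hb6
      simp only [Bool.and_eq_true, decide_eq_true_eq] at h
      exact h.1
    have hitf : it = false := by
      rcases Bool.eq_false_or_eq_true it with h | h
      · exact absurd (by simp [hn, h]) hb5
      · exact h
    have hA : scanStep vp marks line = marks ++ [groupScan vp line marks] := by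
      unfold scanStep
      rw [if_neg h1, if_neg h2, if_neg hc3, if_neg (fun h => hb4 (hc4 ▸ h)),
        if_neg (fun h => hb5 (hc5 ▸ h)), if_pos hb6]
    refine ⟨g.getD line, p1,
      (if (g.getD line) == "text_start" then true
       else if (g.getD line) == "text_end" then false else it),
      (if (g.getD line) == "class_name" then some (extractGroup line) else g), ?_, ?_,
      by rw [hA]; simp⟩
    · rw [hA]; simp only [altStep]
      rw [if_neg h1, if_neg h2, if_neg hc3,
        if_neg (by simpa only [List.length_map] using hb4),
        if_neg (by simpa only [List.length_map] using hb5),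
        if_pos (by simpa only [List.length_map] using hb6)]
      simp [postf, hg line]
    · rw [hA, hg line]
      exact snoc_inv vp marks p1 p2 it g line (g.getD line) hInv hvp (fun _ => hn) (fun _ => hitf)
  by_cases hb7 : PySem.Str.isIn "      |" line = true
  · have hitf : it = false := by
      rcases Bool.eq_false_or_eq_true it with h | h
      · exact absurd (by simp [(hstruct h).1, h]) hb5
      · exact h
    have hA : scanStep vp marks line = marks ++ ["class_name"] := by
      unfold scanStep
      rw [if_neg h1, if_neg h2, if_neg hc3, if_neg (fun h => hb4 (hc4 ▸ h)),
        if_neg (fun h => hb5 (hc5 ▸ h)), if_neg hb6, if_pos hb7]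
    refine ⟨"class_name", p1, it, some (extractGroup line), ?_, ?_, by rw [hA]; simp⟩
    · rw [hA]; simp only [altStep]
      rw [if_neg h1, if_neg h2, if_neg hc3,
        if_neg (by simpa only [List.length_map] using hb4),
        if_neg (by simpa only [List.length_map] using hb5),
        if_neg (by simpa only [List.length_map] using hb6), if_pos hb7]
      simp [postf, hitf]
    · rw [hA]
      simpa using snoc_inv vp marks p1 p2 it g line "class_name" hInv hvp (by simp) (fun _ => hitf)
  · have hA : scanStep vp marks line = marks ++ ["undefined"] := by
      unfold scanStep
      rw [if_neg h1, if_neg h2, if_neg hc3, if_neg (fun h => hb4 (hc4 ▸ h)),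
        if_neg (fun h => hb5 (hc5 ▸ h)), if_neg hb6, if_neg hb7]
    refine ⟨"undefined", p1, it, g, ?_, ?_, by rw [hA]; simp⟩
    · rw [hA]; simp only [altStep]
      rw [if_neg h1, if_neg h2, if_neg hc3,
        if_neg (by simpa only [List.length_map] using hb4),
        if_neg (by simpa only [List.length_map] using hb5),
        if_neg (by simpa only [List.length_map] using hb6), if_neg hb7]
      simp [postf]
    · rw [hA]
      simpa using snoc_inv vp marks p1 p2 it g line "undefined" hInv hvp (by simp) (by simp)

lemma fold_main (vp : List String) :
    ∀ (l marks : List String) (p1 p2 : String) (it : Bool) (g : Option String),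
      vp.drop marks.length = l → ScanInv vp marks p1 p2 it g →
      (List.foldl altStep (marks.map postf, p1, p2, it, g) l).1 =
        (List.foldl (scanStep vp) marks l).map postf := by
  intro l
  induction l with
  | nil => intro marks p1 p2 it g _ _; simp
  | cons line rest ih =>
    intro marks p1 p2 it g hdrop hInv
    obtain ⟨p1', p2', it', g', heq, hInv', hlen⟩ :=
      step_main vp marks p1 p2 it g line rest hdrop hInv
    rw [List.foldl_cons, List.foldl_cons, heq]
    refine ih _ p1' p2' it' g' ?_ hInv'
    rw [hlen, ← List.tail_drop, hdrop]
    rfl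

-- ===== VERDICT (by name: the statement is the Claim_ definition above) =====
theorem scan_spec : Claim_equal_scan := by
  intro vp _
  unfold Spec_scan scan scan_alt
  have h0 : ScanInv vp [] "" "" false none := by
    refine ⟨by simp, by simp, by simp [tsTe, PySem.List.enumerate], by
      intro line; simp [groupScan, PySem.List.enumerate], by simp⟩
  have h := fold_main vp vp [] "" "" false none (by simp) h0
  simp only [List.map_nil] at h
  have hp := postAux (vp.foldl (scanStep vp) []) [] (vp.foldl (scanStep vp) []) (by simp)
  simp only [List.length_nil, Nat.cast_zero, List.nil_append] at hp
  rw [hp]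
  simp [h]
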